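-- pv_equiv track=rewrite | github.com/jeckseveg/Locamotiv | flask_app/utils.py | process_communities
-- ===== SOURCE A (Python) =====
-- def process_communities(communities):
--     unique_communities = set()
--     clusters = []
--     temp_dict = {}
--
--     for key in communities[0]:
--         community = communities[0][key]
--         if community not in unique_communities:
--             unique_communities.add(community)
--             temp_dict[community] = len(unique_communities)
--             clusters.append([])
--         clusters[temp_dict[community]-1].append(key)
--     return clusters
-- ===== SOURCE B (Python) =====
-- def process_communities(communities):
--     d = communities[0]
--     order = list(dict.fromkeys(d.values()))
--     return [[k for k in d if d[k] == c] for c in order]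
-- ===== Notes on version B (the rewrite author's own statement) =====
-- stated objective: alternative
-- what changed: Replaces A's single pass with incremental set/index-dict/bucket bookkeeping by two staged passes: first dedup the community values in first-appearance order, then build each bucket by an independent filter scan of the keys.
-- outside the precondition, e.g. on process_communities([]): A raises IndexError, B raises IndexError
import Mathlib
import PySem

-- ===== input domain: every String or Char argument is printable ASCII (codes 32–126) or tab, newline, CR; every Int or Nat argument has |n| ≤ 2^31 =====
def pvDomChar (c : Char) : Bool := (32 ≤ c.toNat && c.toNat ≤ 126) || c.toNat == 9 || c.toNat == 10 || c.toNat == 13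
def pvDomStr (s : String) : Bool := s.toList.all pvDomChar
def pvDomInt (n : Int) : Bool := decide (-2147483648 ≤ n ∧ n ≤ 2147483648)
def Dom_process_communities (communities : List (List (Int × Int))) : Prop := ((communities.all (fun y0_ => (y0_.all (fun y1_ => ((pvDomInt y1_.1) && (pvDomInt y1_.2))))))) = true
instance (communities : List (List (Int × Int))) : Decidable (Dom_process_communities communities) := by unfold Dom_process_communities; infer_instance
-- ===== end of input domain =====

-- B replaces A's incremental set + index-dict + indexed-bucket pass by two staged passes
-- (dedup the community values, then one filter scan per community); equal return values
-- are proved on non-empty input (A and B both raise IndexError on []).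

-- ===== PORT A =====
-- one loop step of A: `key` is the current dict key, `d0` is communities[0] (for the lookup communities[0][key]);
-- state = (unique_communities, temp_dict, clusters)
def pvStepA (d0 : PySem.Dict Int Int) (st : PySem.Set Int × PySem.Dict Int Int × List (List Int))
    (key : Int) : PySem.Set Int × PySem.Dict Int Int × List (List Int) :=
  let community := d0.getD key 0
  let st2 :=
    if st.1.contains community then st
    else
      let uniq := st.1.add community
      (uniq, st.2.1.insert community (uniq.length : Int), st.2.2 ++ [[]])
  let i := st2.2.1.getD community 0 - 1
  (st2.1, st2.2.1, PySem.List.pySetD st2.2.2 i (PySem.List.pyGetD st2.2.2 i [] ++ [key]))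

def process_communities (communities : List (List (Int × Int))) : List (List Int) :=
  let d0 : PySem.Dict Int Int := PySem.Dict.ofList ((PySem.List.pyGet? communities 0).getD [])
  (d0.keys.foldl (pvStepA d0) (PySem.Set.ofList [], PySem.Dict.empty, [])).2.2

-- ===== PORT B =====
-- d = communities[0]; order = list(dict.fromkeys(d.values())); [[k for k in d if d[k] == c] for c in order]
def process_communities_alt (communities : List (List (Int × Int))) : List (List Int) :=
  let d0 : PySem.Dict Int Int := PySem.Dict.ofList ((PySem.List.pyGet? communities 0).getD [])
  let order : List Int := PySem.List.dedup d0.values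
  order.map (fun c => d0.keys.filter (fun k => d0.getD k 0 == c))

-- ===== PRECONDITION & SPEC =====
-- A evaluates communities[0]; on the empty list it raises IndexError, so [] is excluded.
def Pre_process_communities (communities : List (List (Int × Int))) : Prop := communities ≠ []
instance (communities : List (List (Int × Int))) : Decidable (Pre_process_communities communities) := by unfold Pre_process_communities; infer_instance

def pvWitness_process_communities : (List (List (Int × Int))) := [[(1, 2), (3, 2), (4, 5)]]

def Spec_process_communities (communities : List (List (Int × Int))) (out : List (List Int)) : Prop := out = process_communities_alt communities
instance (communities : List (List (Int × Int))) (out : List (List Int)) : Decidable (Spec_process_communities communities out) := by unfold Spec_process_communities; infer_instance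

-- ===== CLAIM (what is proved, stated in full; the proofs are below) =====
def Claim_equal_process_communities : Prop := ∀ (communities : List (List (Int × Int))), Dom_process_communities communities → Pre_process_communities communities → Spec_process_communities communities (process_communities communities)

-- ===== LEMMAS AND PROOFS =====

-- A's loop step with the community value supplied directly (the lookup d0.getD key 0 resolved)
def pvStepA' (st : PySem.Set Int × PySem.Dict Int Int × List (List Int))
    (kv : Int × Int) : PySem.Set Int × PySem.Dict Int Int × List (List Int) :=
  let community := kv.2
  let st2 :=
    if st.1.contains community then st
    else
      let uniq := st.1.add community
      (uniq, st.2.1.insert community (uniq.length : Int), st.2.2 ++ [[]])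
  let i := st2.2.1.getD community 0 - 1
  (st2.1, st2.2.1, PySem.List.pySetD st2.2.2 i (PySem.List.pyGetD st2.2.2 i [] ++ [kv.1]))

-- the grouping dict A's loop maintains, used as the common reference point of the two proofs
def pvStepG (g : PySem.Dict Int (List Int)) (kv : Int × Int) : PySem.Dict Int (List Int) :=
  g.modify kv.2 [] (· ++ [kv.1])

-- setting the idxOf-c position of a map over nodup keys = mapping with a pointwise override at c
theorem pv_set_map_idxOf {f : Int → List Int} {keys : List Int} {c : Int} (v : List Int)
    (hnd : keys.Nodup) (hc : c ∈ keys) :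
    (keys.map f).set (keys.idxOf c) v = keys.map (fun k => if k = c then v else f k) := by
  induction keys with
  | nil => cases hc
  | cons k0 ks ih =>
    by_cases hk : k0 = c
    · subst hk
      have hnotin : k0 ∉ ks := (List.nodup_cons.mp hnd).1
      simp only [List.idxOf_cons, beq_self_eq_true, cond_true, List.map_cons, List.set_cons_zero]
      congr 1
      exact (List.map_congr_left (fun k hkm => by
        have : k ≠ k0 := fun h => hnotin (h ▸ hkm)
        simp [this])).symm
    · have hc' : c ∈ ks := by
        rcases List.mem_cons.mp hc with h | h
        · exact absurd h.symm hk
        · exact h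
      have hbeq : (k0 == c) = false := by simpa using hk
      simp only [List.idxOf_cons, hbeq, cond_false, List.map_cons, List.set_cons_succ, if_neg hk]
      rw [ih (List.nodup_cons.mp hnd).2 hc']

theorem pv_loop_eq (l : List (Int × Int)) (g : PySem.Dict Int (List Int)) (temp : PySem.Dict Int Int)
    (hnd : g.keys.Nodup)
    (htemp : ∀ c ∈ g.keys, temp.getD c 0 = (g.keys.idxOf c : Int) + 1) :
    (l.foldl pvStepA' (g.keys, temp, g.values)).2.2 = (l.foldl pvStepG g).values := by
  induction l generalizing g temp with
  | nil => simp
  | cons p l ih =>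
    obtain ⟨key, c⟩ := p
    have hvals : g.values = g.keys.map (fun k => g.getD k []) := PySem.Dict.values_eq_map_keys g hnd []
    have hlen : g.values.length = g.keys.length := by
      simp [PySem.Dict.values, PySem.Dict.keys]
    simp only [List.foldl_cons]
    by_cases hc : c ∈ g.keys
    · -- community already seen: A updates the bucket in place, the grouping dict overwrites at c
      have hcont : PySem.Set.contains g.keys c = true := by
        simpa [PySem.Set.contains] using hc
      have hgcont : g.contains c = true := (PySem.Dict.contains_iff_mem_keys g c).mpr hc
      have hidx : g.keys.idxOf c < g.keys.length := List.idxOf_lt_length_of_mem hc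
      have htc := htemp c hc
      have hkeys' : (pvStepG g (key, c)).keys = g.keys := by
        simp only [pvStepG, PySem.Dict.modify]
        exact PySem.Dict.keys_insert_of_contains g _ hgcont
      have hnd' : (pvStepG g (key, c)).keys.Nodup := by rw [hkeys']; exact hnd
      have hvals' : (pvStepG g (key, c)).values
          = g.keys.map (fun k => if k = c then g.getD c [] ++ [key] else g.getD k []) := by
        rw [PySem.Dict.values_eq_map_keys _ hnd' [], hkeys']
        refine List.map_congr_left (fun k _ => ?_)
        simp [pvStepG, PySem.Dict.getD_modify]
      have hstep : pvStepA' (g.keys, temp, g.values) (key, c)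
          = (g.keys, temp, (pvStepG g (key, c)).values) := by
        simp only [pvStepA', hcont, if_true]
        have hi : temp.getD c 0 - 1 = ((g.keys.idxOf c : Nat) : Int) := by rw [htc]; ring
        rw [hi, PySem.List.pySetD_natCast, PySem.List.pyGetD_natCast]
        have hget : g.values.getD (g.keys.idxOf c) [] = g.getD c [] := by
          rw [hvals, List.getD_eq_getElem _ _ (by simpa using hidx), List.getElem_map,
            List.getElem_idxOf hidx]
        rw [hget, hvals, pv_set_map_idxOf _ hnd hc, hvals']
      rw [hstep]
      have hrec := ih (pvStepG g (key, c)) temp hnd' (by rw [hkeys']; exact htemp)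
      rw [hkeys'] at hrec
      exact hrec
    · -- new community: both append a fresh bucket at the end
      have hcont : PySem.Set.contains g.keys c = false := by
        simpa [PySem.Set.contains] using hc
      have hgcont : g.contains c = false := by
        rw [← Bool.not_eq_true]
        exact fun h => hc ((PySem.Dict.contains_iff_mem_keys g c).mp h)
      have hadd : PySem.Set.add g.keys c = g.keys ++ [c] := by
        simp [PySem.Set.add, hc]
      have hgd0 : g.getD c ([] : List Int) = [] := PySem.Dict.getD_of_not_contains g [] hgcont
      have hitems' : (pvStepG g (key, c)).items = g.items ++ [(c, [key])] := by
        simp only [pvStepG, PySem.Dict.modify, hgd0, List.nil_append]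
        exact PySem.Dict.items_insert_of_not_contains g [key] hgcont
      have hkeys' : (pvStepG g (key, c)).keys = g.keys ++ [c] := by
        simp [PySem.Dict.keys, hitems']
      have hvals' : (pvStepG g (key, c)).values = g.values ++ [[key]] := by
        simp [PySem.Dict.values, hitems']
      have hnd' : (pvStepG g (key, c)).keys.Nodup := by
        rw [hkeys']
        exact List.Nodup.append hnd (List.nodup_singleton c)
          (by simpa [List.disjoint_singleton] using hc)
      have hstep : pvStepA' (g.keys, temp, g.values) (key, c)
          = (g.keys ++ [c], temp.insert c ((g.keys.length : Int) + 1), g.values ++ [[key]]) := by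
        simp only [pvStepA', hcont, Bool.false_eq_true, if_false, hadd]
        have hlenadd : ((g.keys ++ [c]).length : Int) = (g.keys.length : Int) + 1 := by
          simp
        rw [hlenadd]
        have hgd : (temp.insert c ((g.keys.length : Int) + 1)).getD c 0 = (g.keys.length : Int) + 1 := by
          simp
        rw [hgd]
        have hi : (g.keys.length : Int) + 1 - 1 = ((g.keys.length : Nat) : Int) := by ring
        rw [hi, PySem.List.pySetD_natCast, PySem.List.pyGetD_natCast]
        have hget : (g.values ++ [[]]).getD g.keys.length ([] : List Int) = [] := by
          rw [List.getD_append_right _ _ _ _ (by omega)]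
          simp [hlen]
        rw [hget]
        have hset : (g.values ++ [([] : List Int)]).set g.keys.length ([] ++ [key]) = g.values ++ [[key]] := by
          rw [List.set_append, if_neg (by omega)]
          simp [hlen]
        rw [hset]
      rw [hstep]
      have htemp' : ∀ c' ∈ (pvStepG g (key, c)).keys,
          (temp.insert c ((g.keys.length : Int) + 1)).getD c' 0
            = (((pvStepG g (key, c)).keys.idxOf c' : Nat) : Int) + 1 := by
        intro c' hc'
        rw [hkeys'] at hc' ⊢
        rcases List.mem_append.mp hc' with h | h
        · have hne : c' ≠ c := fun he => hc (he ▸ h)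
          rw [PySem.Dict.getD_insert, if_neg hne, htemp c' h, List.idxOf_append, if_pos h]
        · have he : c' = c := by simpa using h
          subst he
          rw [PySem.Dict.getD_insert, if_pos rfl, List.idxOf_append, if_neg hc]
          simp
      have := ih (pvStepG g (key, c)) (temp.insert c ((g.keys.length : Int) + 1)) hnd' htemp'
      rw [hkeys', hvals'] at this
      exact this

theorem pv_fold_keys_eq (ps : List (Int × Int)) :
    (PySem.Dict.ofList ps).keys.foldl (pvStepA (PySem.Dict.ofList ps))
        (PySem.Set.ofList [], PySem.Dict.empty, [])
    = (PySem.Dict.ofList ps).items.foldl pvStepA' (PySem.Set.ofList [], PySem.Dict.empty, []) := by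
  have hnd := PySem.Dict.nodup_keys_ofList ps
  have hk : (PySem.Dict.ofList ps).keys = (PySem.Dict.ofList ps).items.map (·.1) := rfl
  rw [hk, List.foldl_map]
  exact PySem.List.foldl_congr_mem _ _ _ _ (fun acc p hp => by
    have hlook : (PySem.Dict.ofList ps).getD p.1 0 = p.2 := by
      obtain ⟨k, v⟩ := p
      exact PySem.Dict.getD_of_mem_items _ hp hnd 0
    simp [pvStepA, pvStepA', hlook])

-- the grouping dict, characterised: its keys are the deduped values, its buckets the filter scans
theorem pv_keys_fold_G (ps : List (Int × Int)) :
    (ps.foldl pvStepG PySem.Dict.empty).keys = PySem.List.dedup (ps.map (·.2)) := by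
  have : (ps.foldl pvStepG PySem.Dict.empty).keys
      = PySem.Set.update PySem.Dict.empty.keys (ps.map (·.2)) :=
    PySem.Dict.keys_foldl_modify_key ps (·.2) [] (fun _ kv => (· ++ [kv.1])) PySem.Dict.empty
  rw [this]
  simp [PySem.Set.update_nil_left]

theorem pv_getD_fold_G (ps : List (Int × Int)) (c : Int) :
    (ps.foldl pvStepG PySem.Dict.empty).getD c []
      = (ps.filter (fun p => p.2 == c)).map (·.1) := by
  have hswap : ps.foldl pvStepG PySem.Dict.empty
      = (ps.map Prod.swap).foldl (fun d p => d.modify p.1 [] (· ++ [p.2])) PySem.Dict.empty := by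
    rw [List.foldl_map]
    rfl
  rw [hswap, PySem.Dict.getD_foldl_modify_append, List.filter_map, List.map_map]
  simp only [Function.comp_def, Prod.fst_swap, Prod.snd_swap, PySem.Dict.getD_empty,
    List.nil_append]

theorem pv_G_values (ps : List (Int × Int)) :
    (ps.foldl pvStepG PySem.Dict.empty).values
      = (PySem.List.dedup (ps.map (·.2))).map (fun c => (ps.filter (fun p => p.2 == c)).map (·.1)) := by
  have hndG : (ps.foldl pvStepG PySem.Dict.empty).keys.Nodup := by
    rw [pv_keys_fold_G]
    exact PySem.List.nodup_dedup _
  rw [PySem.Dict.values_eq_map_keys _ hndG [], pv_keys_fold_G]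
  exact List.map_congr_left (fun c _ => pv_getD_fold_G ps c)

-- port B's filter over keys = the filter over items, projected
theorem pv_alt_bucket (ps : List (Int × Int)) (c : Int) :
    (PySem.Dict.ofList ps).keys.filter (fun k => (PySem.Dict.ofList ps).getD k 0 == c)
      = ((PySem.Dict.ofList ps).items.filter (fun p => p.2 == c)).map (·.1) := by
  have hnd := PySem.Dict.nodup_keys_ofList ps
  have hk : (PySem.Dict.ofList ps).keys = (PySem.Dict.ofList ps).items.map (·.1) := rfl
  rw [hk, List.filter_map]
  congr 1
  refine List.filter_congr (fun p hp => ?_)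
  obtain ⟨k, v⟩ := p
  simp [Function.comp, PySem.Dict.getD_of_mem_items _ hp hnd 0]

-- ===== VERDICT (by name: the statement is the Claim_ definition above) =====
theorem process_communities_spec : Claim_equal_process_communities := by
  intro communities _ _
  unfold Spec_process_communities process_communities process_communities_alt
  show ((PySem.Dict.ofList ((PySem.List.pyGet? communities 0).getD [])).keys.foldl
      (pvStepA _) (PySem.Set.ofList [], PySem.Dict.empty, [])).2.2 = _
  rw [pv_fold_keys_eq]
  exact (pv_loop_eq _ PySem.Dict.empty PySem.Dict.empty (by simp) (by simp)).trans (by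
    rw [pv_G_values]
    exact List.map_congr_left (fun c _ => (pv_alt_bucket _ c).symm))
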